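-- pv_equiv track=rewrite | github.com/joepvdbogaert/fdsim | fdsim/experiments.py | _find_closest_higher_multiple
-- ===== SOURCE A (Python) =====
-- def _find_closest_higher_multiple(x, multiple, maximum=None):
--     while True:
--         if x % multiple == 0:
--             break
--         x += 1
--     while x > maximum:
--         x -= multiple
--     return x
-- ===== SOURCE B (Python) =====
-- def _find_closest_higher_multiple(x, multiple, maximum=None):
--     x += (-x) % multiple
--     if x > maximum:
--         x -= ((x - maximum + multiple - 1) // multiple) * multiple
--     return x
-- ===== Notes on version B (the rewrite author's own statement) =====
-- stated objective: faster
-- what changed: Replaced both while-loops (increment-by-1 round-up, then repeated subtraction below the maximum) with closed-form modular arithmetic: x += (-x) % multiple, then a single ceiling-division step down when above the maximum.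
-- outside the precondition, e.g. on _find_closest_higher_multiple(5, -3, 10): A returns 6, B returns 3
import Mathlib
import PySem

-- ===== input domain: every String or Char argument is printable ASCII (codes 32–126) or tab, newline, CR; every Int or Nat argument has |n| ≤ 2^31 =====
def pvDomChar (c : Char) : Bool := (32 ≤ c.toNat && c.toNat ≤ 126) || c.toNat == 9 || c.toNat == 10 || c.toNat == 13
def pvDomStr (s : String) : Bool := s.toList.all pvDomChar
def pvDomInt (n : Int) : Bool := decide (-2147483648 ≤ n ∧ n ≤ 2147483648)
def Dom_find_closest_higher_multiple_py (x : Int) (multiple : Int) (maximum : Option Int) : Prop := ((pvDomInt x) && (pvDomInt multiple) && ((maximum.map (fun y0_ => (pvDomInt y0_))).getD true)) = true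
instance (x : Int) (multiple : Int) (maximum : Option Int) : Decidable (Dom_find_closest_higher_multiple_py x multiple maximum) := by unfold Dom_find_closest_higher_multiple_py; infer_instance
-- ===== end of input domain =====

-- B replaces A's two while-loops with closed-form modular arithmetic (one mod, one ceiling division); objective: faster.

-- ===== PORT A =====
-- first loop: while x % multiple != 0: x += 1   (fuel only makes it total; inside Pre_ the fuel is sufficient)
def pvLoop1 (fuel : Nat) (x : Int) (multiple : Int) : Int :=
  match fuel with
  | 0 => x
  | fuel + 1 => if PySem.Int.mod x multiple = 0 then x else pvLoop1 fuel (x + 1) multiple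

-- second loop: while x > maximum: x -= multiple
def pvLoop2 (fuel : Nat) (x : Int) (multiple : Int) (m : Int) : Int :=
  match fuel with
  | 0 => x
  | fuel + 1 => if x > m then pvLoop2 fuel (x - multiple) multiple m else x

def find_closest_higher_multiple_py (x : Int) (multiple : Int) (maximum : Option Int) : Int :=
  match maximum with
  | none => x   -- Python raises TypeError comparing to None; excluded by Pre_
  | some m =>
    let x1 := pvLoop1 (multiple.natAbs + 1) x multiple
    pvLoop2 ((x1 - m).natAbs + 1) x1 multiple m

-- ===== PORT B =====
def find_closest_higher_multiple_py_alt (x : Int) (multiple : Int) (maximum : Option Int) : Int :=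
  match maximum with
  | none => x   -- Python raises TypeError comparing to None; excluded by Pre_
  | some m =>
    let y := x + PySem.Int.mod (-x) multiple
    if y > m then y - (PySem.Int.floordiv (y - m + multiple - 1) multiple) * multiple else y

-- ===== PRECONDITION & SPEC =====
-- Pre_ excludes multiple = 0 and maximum = None, on which Python A raises (ZeroDivisionError / TypeError),
-- and, for negative multiple, the inputs where A either diverges (its value would exceed maximum) or
-- returns an upward rounding to a negative multiple that is an accident of its `x += 1` loop.
def Pre_find_closest_higher_multiple_py (x : Int) (multiple : Int) (maximum : Option Int) : Prop :=
  multiple ≠ 0 ∧ maximum.isSome ∧ (multiple < 0 → x % multiple = 0 ∧ x ≤ maximum.getD 0)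
instance (x : Int) (multiple : Int) (maximum : Option Int) : Decidable (Pre_find_closest_higher_multiple_py x multiple maximum) := by unfold Pre_find_closest_higher_multiple_py; infer_instance

def pvWitness_find_closest_higher_multiple_py : Int × Int × Option Int := (7, 5, some 30)

def Spec_find_closest_higher_multiple_py (x : Int) (multiple : Int) (maximum : Option Int) (out : Int) : Prop := out = find_closest_higher_multiple_py_alt x multiple maximum
instance (x : Int) (multiple : Int) (maximum : Option Int) (out : Int) : Decidable (Spec_find_closest_higher_multiple_py x multiple maximum out) := by unfold Spec_find_closest_higher_multiple_py; infer_instance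

-- ===== CLAIM (what is proved, stated in full; the proofs are below) =====
def Claim_equal_find_closest_higher_multiple_py : Prop := ∀ (x : Int) (multiple : Int) (maximum : Option Int), Dom_find_closest_higher_multiple_py x multiple maximum → Pre_find_closest_higher_multiple_py x multiple maximum → Spec_find_closest_higher_multiple_py x multiple maximum (find_closest_higher_multiple_py x multiple maximum)

-- ===== LEMMAS AND PROOFS =====

-- loop 1 computes the round-up x + (-x) % multiple, given enough fuel
theorem pvLoop1_eq (multiple : Int) (hb : 0 < multiple) :
    ∀ (fuel : Nat) (x : Int), (PySem.Int.mod (-x) multiple).toNat < fuel →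
      pvLoop1 fuel x multiple = x + PySem.Int.mod (-x) multiple := by
  intro fuel
  induction fuel with
  | zero => intro x h; omega
  | succ n ih =>
    intro x h
    have hb' : multiple ≠ 0 := by omega
    rw [PySem.Int.mod_eq_emod_of_pos hb] at h ⊢
    simp only [pvLoop1]
    by_cases h0 : PySem.Int.mod x multiple = 0
    · have : multiple ∣ x := (PySem.Int.mod_eq_zero_iff_dvd x multiple).mp h0
      have : (-x) % multiple = 0 := Int.emod_eq_zero_of_dvd this.neg_right
      simp [h0, this]
    · rw [if_neg h0]
      have hx : x % multiple ≠ 0 := by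
        rwa [PySem.Int.mod_eq_emod_of_pos hb] at h0
      have hx1 : 0 ≤ x % multiple := Int.emod_nonneg x hb'
      have hx2 : x % multiple < multiple := Int.emod_lt_of_pos x hb
      -- (-x) % multiple = multiple - x % multiple
      have key : (-x) % multiple = multiple - x % multiple := by
        have : (-x) % multiple = (multiple - x % multiple) % multiple := by
          conv_lhs => rw [show -x = (multiple - x % multiple) + (-(x / multiple) - 1) * multiple by
            have := Int.mul_ediv_add_emod x multiple; ring_nf; linarith]
          rw [Int.add_mul_emod_self_right]
        rw [this, Int.emod_eq_of_lt (by omega) (by omega)]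
      have key' : (-(x + 1)) % multiple = (-x) % multiple - 1 := by
        have : (-(x+1)) % multiple = ((-x) % multiple - 1) % multiple := by
          conv_lhs => rw [show -(x+1) = ((-x) % multiple - 1) + (-x / multiple) * multiple by
            have := Int.mul_ediv_add_emod (-x) multiple; ring_nf; linarith]
          rw [Int.add_mul_emod_self_right]
        rw [this, Int.emod_eq_of_lt (by omega) (by omega)]
      have hrec := ih (x + 1)
      rw [PySem.Int.mod_eq_emod_of_pos hb] at hrec
      rw [hrec (by omega), key']
      ring
-- loop 2 equals B's single ceiling-division step, given enough fuel
theorem pvLoop2_eq (multiple m : Int) (hb : 0 < multiple) :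
    ∀ (fuel : Nat) (x : Int), (x - m).toNat < fuel →
      pvLoop2 fuel x multiple m =
        if x > m then x - (PySem.Int.floordiv (x - m + multiple - 1) multiple) * multiple else x := by
  intro fuel
  induction fuel with
  | zero => intro x h; omega
  | succ n ih =>
    intro x h
    have hb' : multiple ≠ 0 := by omega
    simp only [pvLoop2]
    by_cases hgt : x > m
    · rw [if_pos hgt, if_pos hgt, ih (x - multiple) (by omega)]
      simp only [PySem.Int.floordiv_eq_ediv_of_pos hb]
      by_cases hgt2 : x - multiple > m
      · rw [if_pos hgt2]
        have e1 : x - m + multiple - 1 = (x - m - 1) + 1 * multiple := by ring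
        have e2 : x - multiple - m + multiple - 1 = x - m - 1 := by ring
        rw [e1, e2, Int.add_mul_ediv_right _ _ hb']
        ring
      · rw [if_neg hgt2]
        -- here 0 < x - m ≤ multiple, so the ceiling division is 1
        have e1 : x - m + multiple - 1 = (x - m - 1) + 1 * multiple := by ring
        have hz : (x - m - 1) / multiple = 0 :=
          Int.ediv_eq_zero_of_lt (by omega) (by omega)
        rw [e1, Int.add_mul_ediv_right _ _ hb', hz]
        ring
    · rw [if_neg hgt, if_neg hgt]

-- ===== VERDICT (by name: the statement is the Claim_ definition above) =====
theorem find_closest_higher_multiple_py_spec : Claim_equal_find_closest_higher_multiple_py := by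
  intro x multiple maximum _hdom hpre
  obtain ⟨hne, hsome, hneg⟩ := hpre
  unfold Spec_find_closest_higher_multiple_py
  match maximum, hsome with
  | some m, _ =>
    unfold find_closest_higher_multiple_py find_closest_higher_multiple_py_alt
    rcases lt_or_gt_of_ne hne with hlt | hb
    · -- multiple < 0: Pre_ forces multiple ∣ x and x ≤ m, both sides return x
      obtain ⟨hdvd, hle⟩ := hneg hlt
      have hdvd' : multiple ∣ x := Int.dvd_of_emod_eq_zero hdvd
      have hm0 : PySem.Int.mod x multiple = 0 :=
        (PySem.Int.mod_eq_zero_iff_dvd x multiple).mpr hdvd'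
      have hm0' : PySem.Int.mod (-x) multiple = 0 :=
        (PySem.Int.mod_eq_zero_iff_dvd (-x) multiple).mpr hdvd'.neg_right
      simp only [Option.getD] at hle
      simp [pvLoop1, pvLoop2, hm0, hm0', not_lt.mpr hle]
    have hr1 : 0 ≤ PySem.Int.mod (-x) multiple := PySem.Int.mod_nonneg _ (by omega)
    have hr2 : PySem.Int.mod (-x) multiple < multiple := PySem.Int.mod_lt _ hb
    have h1 : pvLoop1 (multiple.natAbs + 1) x multiple = x + PySem.Int.mod (-x) multiple :=
      pvLoop1_eq multiple hb _ x (by omega)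
    simp only [h1]
    exact pvLoop2_eq multiple m hb _ _ (by omega)
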